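-- pv_equiv track=rewrite | github.com/koushik-sarma/SmartDocChat | services/comparison_service.py | _find_common_themes
-- ===== SOURCE A (Python) =====
-- from typing import List, Dict, Set
--
-- def _find_common_themes(doc_word_sets: Dict[str, Set[str]]) -> List[str]:
--     """Find words common across all documents."""
--     if not doc_word_sets:
--         return []
--
--     # Find intersection of all word sets
--     common_words = set.intersection(*doc_word_sets.values()) if doc_word_sets else set()
--
--     # Remove very common words (basic filtering)
--     stop_words = {
--         'the', 'and', 'that', 'have', 'for', 'not', 'with', 'you', 'this', 'but',
--         'his', 'from', 'they', 'she', 'her', 'been', 'than', 'its', 'were', 'said'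
--     }
--
--     filtered_words = [word for word in common_words if word not in stop_words]
--
--     # Return top 20 most meaningful common themes
--     return sorted(filtered_words)[:20]
-- ===== SOURCE B (Python) =====
-- from typing import List, Dict, Set
--
-- def _find_common_themes(doc_word_sets: Dict[str, Set[str]]) -> List[str]:
--     """Find words common across all documents (count-threshold formulation)."""
--     if not doc_word_sets:
--         return []
--
--     n = len(doc_word_sets)
--
--     # One pass: count in how many document sets each word occurs.
--     counts = {}
--     for word_set in doc_word_sets.values():
--         for word in word_set:
--             counts[word] = counts.get(word, 0) + 1
--
--     stop_words = {
--         'the', 'and', 'that', 'have', 'for', 'not', 'with', 'you', 'this', 'but',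
--         'his', 'from', 'they', 'she', 'her', 'been', 'than', 'its', 'were', 'said'
--     }
--
--     # A word is a common theme iff it occurs in all n sets.
--     return sorted(w for w, c in counts.items() if c == n and w not in stop_words)[:20]
-- ===== Notes on version B (the rewrite author's own statement) =====
-- stated objective: alternative
-- what changed: B replaces the fold of pairwise set intersections with a single counting pass over all document word sets, selecting the words whose document count equals the number of documents; the stop-word filter, sorted() and [:20] slice are kept.
import Mathlib
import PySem

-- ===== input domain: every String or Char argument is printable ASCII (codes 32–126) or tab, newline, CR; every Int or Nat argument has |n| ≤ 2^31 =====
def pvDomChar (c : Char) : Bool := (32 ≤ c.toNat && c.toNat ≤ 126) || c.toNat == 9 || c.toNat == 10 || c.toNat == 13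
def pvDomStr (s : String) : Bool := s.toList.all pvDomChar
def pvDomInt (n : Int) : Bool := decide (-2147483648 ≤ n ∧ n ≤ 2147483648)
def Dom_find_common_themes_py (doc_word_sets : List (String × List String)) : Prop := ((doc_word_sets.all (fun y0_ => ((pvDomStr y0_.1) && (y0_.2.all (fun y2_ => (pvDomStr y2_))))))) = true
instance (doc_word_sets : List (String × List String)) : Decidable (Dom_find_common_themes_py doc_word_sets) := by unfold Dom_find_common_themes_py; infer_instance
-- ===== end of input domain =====

-- B replaces the fold of pairwise set intersections by a single occurrence-counting pass
-- (a word is common iff its document count equals the number of documents); objective: alternative/idiomatic.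

-- the stop_words set literal shared by both Pythons
def pvStopWords : List String :=
  ["the", "and", "that", "have", "for", "not", "with", "you", "this", "but",
   "his", "from", "they", "she", "her", "been", "than", "its", "were", "said"]

-- ===== PORT A =====
def find_common_themes_py (doc_word_sets : List (String × List String)) : List String :=
  match doc_word_sets with
  | [] => []
  | (_, v) :: tl =>
    -- common_words = set.intersection(*doc_word_sets.values())
    let common_words := (tl.map Prod.snd).foldl (fun acc ws => PySem.Set.inter acc ws) v
    -- filtered_words = [word for word in common_words if word not in stop_words]
    let filtered_words := common_words.filter (fun w => !(pvStopWords.contains w))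
    -- return sorted(filtered_words)[:20]
    (PySem.List.sorted filtered_words (fun x => x) false).take 20

-- ===== PORT B =====
def find_common_themes_py_alt (doc_word_sets : List (String × List String)) : List String :=
  match doc_word_sets with
  | [] => []
  | hd :: tl =>
    let n : Int := ((hd :: tl : List (String × List String)).length : Int)
    -- counts[word] = counts.get(word, 0) + 1 over every word of every document set
    let counts := (hd :: tl).foldl
      (fun d (p : String × List String) =>
        p.2.foldl (fun d w => PySem.Dict.modify d w 0 (· + 1)) d)
      (PySem.Dict.empty : PySem.Dict String Int)
    -- sorted(w for w, c in counts.items() if c == n and w not in stop_words)[:20]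
    let themes := (counts.items.filter
      (fun p => p.2 == n && !(pvStopWords.contains p.1))).map Prod.fst
    (PySem.List.sorted themes (fun x => x) false).take 20

-- ===== PRECONDITION & SPEC =====
-- Pre_ excludes association lists with duplicate keys (they do not faithfully represent a
-- Python dict: the dict collapses them) and value lists with duplicate elements (they do not
-- represent Python sets, whose Lean encoding is a duplicate-free list).
def Pre_find_common_themes_py (doc_word_sets : List (String × List String)) : Prop :=
  (doc_word_sets.map Prod.fst).Nodup ∧ ∀ p ∈ doc_word_sets, p.2.Nodup
instance (doc_word_sets : List (String × List String)) : Decidable (Pre_find_common_themes_py doc_word_sets) := by unfold Pre_find_common_themes_py; infer_instance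

def pvWitness_find_common_themes_py : (List (String × List String)) :=
  [("a.txt", ["cat", "dog", "the"]), ("b.txt", ["dog", "bird", "the"])]

def Spec_find_common_themes_py (doc_word_sets : List (String × List String)) (out : List String) : Prop := out = find_common_themes_py_alt doc_word_sets
instance (doc_word_sets : List (String × List String)) (out : List String) : Decidable (Spec_find_common_themes_py doc_word_sets out) := by unfold Spec_find_common_themes_py; infer_instance

-- ===== CLAIM (what is proved, stated in full; the proofs are below) =====
def Claim_equal_find_common_themes_py : Prop := ∀ (doc_word_sets : List (String × List String)), Dom_find_common_themes_py doc_word_sets → Pre_find_common_themes_py doc_word_sets → Spec_find_common_themes_py doc_word_sets (find_common_themes_py doc_word_sets)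

-- ===== LEMMAS AND PROOFS =====

-- the double counting fold is Counter of the flattened word lists
theorem counts_eq_counter (l : List (String × List String)) :
    l.foldl (fun d (p : String × List String) =>
        p.2.foldl (fun d w => PySem.Dict.modify d w 0 (· + 1)) d)
      (PySem.Dict.empty : PySem.Dict String Int)
    = PySem.Dict.counter ((l.map Prod.snd).flatten) := by
  rw [PySem.Dict.counter_eq_foldl]
  generalize (PySem.Dict.empty : PySem.Dict String Int) = d
  induction l generalizing d with
  | nil => rfl
  | cons h t ih => simp [List.foldl_append, ih]

-- membership in the fold of intersections
theorem mem_foldl_inter (rest : List (List String)) (v : List String) (w : String) :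
    w ∈ rest.foldl (fun acc ws => PySem.Set.inter acc ws) v ↔
      w ∈ v ∧ ∀ ws ∈ rest, w ∈ ws := by
  induction rest generalizing v with
  | nil => simp
  | cons h t ih =>
    simp only [List.foldl_cons, ih, PySem.Set.mem_inter v h w, List.mem_cons]
    constructor
    · rintro ⟨⟨hv, hh⟩, ht⟩
      exact ⟨hv, by rintro ws (rfl | hws); exact hh; exact ht ws hws⟩
    · rintro ⟨hv, hall⟩
      exact ⟨⟨hv, hall h (Or.inl rfl)⟩, fun ws hws => hall ws (Or.inr hws)⟩

theorem nodup_foldl_inter (rest : List (List String)) (v : List String) (hv : v.Nodup) :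
    (rest.foldl (fun acc ws => PySem.Set.inter acc ws) v).Nodup := by
  induction rest generalizing v with
  | nil => exact hv
  | cons h t ih =>
    exact ih _ (by simpa only [PySem.Set.inter] using hv.filter _)

-- the count of a word in the flattened lists equals the number of lists iff it is in all of them
theorem count_flatten_le (vals : List (List String)) (w : String)
    (hnd : ∀ ws ∈ vals, ws.Nodup) :
    vals.flatten.count w ≤ vals.length := by
  induction vals with
  | nil => simp
  | cons h t ih =>
    have hh : h.count w ≤ 1 := by
      have := hnd h (by simp); rw [List.nodup_iff_count_le_one] at this; exact this w
    have ht := ih (fun ws hws => hnd ws (by simp [hws]))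
    simp only [List.flatten_cons, List.count_append, List.length_cons]
    omega

-- the count of a word in the flattened lists equals the number of lists iff it is in all of them
theorem count_flatten_eq_length_iff (vals : List (List String)) (w : String)
    (hnd : ∀ ws ∈ vals, ws.Nodup) :
    (vals.flatten.count w = vals.length) ↔ ∀ ws ∈ vals, w ∈ ws := by
  induction vals with
  | nil => simp
  | cons h t ih =>
    have hh : h.count w ≤ 1 := by
      have := hnd h (by simp); rw [List.nodup_iff_count_le_one] at this; exact this w
    have ht : t.flatten.count w ≤ t.length := count_flatten_le t w (fun ws hws => hnd ws (by simp [hws]))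
    have ihs := ih (fun ws hws => hnd ws (by simp [hws]))
    simp only [List.flatten_cons, List.count_append, List.length_cons]
    constructor
    · intro heq
      have hh1 : h.count w = 1 := by omega
      have ht1 : t.flatten.count w = t.length := by omega
      intro ws hws
      rcases List.mem_cons.mp hws with rfl | hws'
      · exact List.count_pos_iff.mp (by omega)
      · exact ihs.mp ht1 ws hws'
    · intro hall
      have hh1 : h.count w = 1 := by
        have : 0 < h.count w := List.count_pos_iff.mpr (hall h (by simp))
        omega
      have ht1 : t.flatten.count w = t.length :=
        ihs.mpr (fun ws hws => hall ws (List.mem_cons.mpr (Or.inr hws)))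
      omega

-- ===== VERDICT (by name: the statement is the Claim_ definition above) =====
theorem find_common_themes_py_spec : Claim_equal_find_common_themes_py := by
  intro l _hdom hpre
  unfold Spec_find_common_themes_py
  obtain ⟨hkeys, hvals⟩ := hpre
  match l with
  | [] => rfl
  | (k, v) :: tl =>
    unfold find_common_themes_py find_common_themes_py_alt
    simp only []
    rw [counts_eq_counter, PySem.Dict.items_counter, List.filter_map, List.map_map]
    set vals : List (List String) := ((k, v) :: tl).map Prod.snd with hvalsdef
    have hvnodup : ∀ ws ∈ vals, ws.Nodup := by
      intro ws hws
      simp only [hvalsdef, List.mem_map] at hws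
      obtain ⟨p, hp, rfl⟩ := hws
      exact hvals p hp
    -- the two pre-sort lists are duplicate-free and have the same members
    set A := ((tl.map Prod.snd).foldl (fun acc ws => PySem.Set.inter acc ws) v).filter
      (fun w => !(pvStopWords.contains w)) with hA
    set B := (PySem.Set.ofList vals.flatten).filter
      (fun w => decide ((vals.flatten.count w : Int) = (vals.length : Int)) && !(pvStopWords.contains w)) with hB
    have hBeq : ((PySem.Set.ofList vals.flatten).filter
        ((fun p => p.2 == ((vals.length : Int)) && !(pvStopWords.contains p.1)) ∘
          fun k => (k, (vals.flatten.count k : Int)))).map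
          (Prod.fst ∘ fun k => (k, (vals.flatten.count k : Int))) = B := by
      rw [hB]
      have : (Prod.fst ∘ fun k : String => (k, (vals.flatten.count k : Int))) = id := rfl
      rw [this, List.map_id]
      congr 1
    have hAnodup : A.Nodup := (nodup_foldl_inter _ _ (hvals (k, v) (by simp))).filter _
    have hBnodup : B.Nodup := (PySem.Set.nodup_ofList _).filter _
    have hmem : ∀ w, w ∈ A ↔ w ∈ B := by
      intro w
      rw [hA, hB]
      simp only [List.mem_filter, mem_foldl_inter, PySem.Set.mem_ofList, List.mem_flatten,
        Bool.and_eq_true, decide_eq_true_eq, Int.natCast_inj,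
        count_flatten_eq_length_iff vals w hvnodup]
      constructor
      · rintro ⟨⟨hv, htl⟩, hstop⟩
        have hall : ∀ ws ∈ vals, w ∈ ws := by
          intro ws hws
          simp only [hvalsdef, List.map_cons, List.mem_cons] at hws
          rcases hws with rfl | hws'
          · exact hv
          · exact htl ws (by simpa using hws')
        exact ⟨⟨v, by simp [hvalsdef], hv⟩, hall, hstop⟩
      · rintro ⟨_, hall, hstop⟩
        refine ⟨⟨hall v (by simp [hvalsdef]), fun ws hws => hall ws ?_⟩, hstop⟩
        simp only [hvalsdef, List.map_cons, List.mem_cons]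
        exact Or.inr hws
    have hperm : A.Perm B := (List.perm_ext_iff_of_nodup hAnodup hBnodup).mpr hmem
    have hn : ((((k, v) :: tl : List (String × List String)).length : Int)) = ((vals.length : Int)) := by
      simp [hvalsdef]
    rw [hn, hBeq,
      PySem.List.sorted_eq_sorted_of_perm A B (fun x => x) (fun a b h => h) hperm]
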